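-- pv_equiv track=rewrite | github.com/ParasharaRamesh/DSA-Prep | datastructures/Difference Arrays.py | apply_updates_using_accumulated_change
-- ===== SOURCE A (Python) =====
-- def apply_updates_using_accumulated_change(original_arr, updates):
--     """
--     Model B: Create a separate 'change log' array.
--     Calculate the total impact of all updates first, then merge.
--     """
--     n = len(original_arr)
--     # change_log[i] tracks the START and END of adjustments
--     change_log = [0] * (n + 1)
--
--     # 1. Record changes in O(1)
--     for L, R, v in updates:
--         change_log[L] += v
--         change_log[R + 1] -= v
--
--     # 2. Convert change_log into actual adjustment values using prefix sum
--     # and apply them to the original array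
--     current_running_change = 0
--     for i in range(n):
--         current_running_change += change_log[i]
--         original_arr[i] += current_running_change
--
--     return original_arr
-- ===== SOURCE B (Python) =====
-- def apply_updates_using_accumulated_change(original_arr, updates):
--     n = len(original_arr)
--     for L, R, v in updates:
--         # a range update [L, R] is the difference of two suffix updates
--         for i in range(L, n):
--             original_arr[i] += v
--         for i in range(R + 1, n):
--             original_arr[i] -= v
--     return original_arr
-- ===== Notes on version B (the rewrite author's own statement) =====
-- stated objective: simpler
-- what changed: Drops the change-log array and the prefix-sum pass: each update is applied immediately as two direct suffix scans (add v from L to the end, subtract v from R+1 to the end); Pre_ excludes updates whose change-log positions are invalid Python indices (A raises IndexError) and updates with an effective negative endpoint, where A's value is an accident of negative-index wraparound in the length-(n+1) change log and B wraps on the array itself or raises.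
-- outside the precondition, e.g. on apply_updates_using_accumulated_change([1, 2, 3], [(-1, 2, 5)]): A returns [1, 2, 3], B returns [6, 7, 13]; on apply_updates_using_accumulated_change([1, 2, 3], [(-4, 0, 5)]): A returns [6, 2, 3], B raises IndexError
import Mathlib
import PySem

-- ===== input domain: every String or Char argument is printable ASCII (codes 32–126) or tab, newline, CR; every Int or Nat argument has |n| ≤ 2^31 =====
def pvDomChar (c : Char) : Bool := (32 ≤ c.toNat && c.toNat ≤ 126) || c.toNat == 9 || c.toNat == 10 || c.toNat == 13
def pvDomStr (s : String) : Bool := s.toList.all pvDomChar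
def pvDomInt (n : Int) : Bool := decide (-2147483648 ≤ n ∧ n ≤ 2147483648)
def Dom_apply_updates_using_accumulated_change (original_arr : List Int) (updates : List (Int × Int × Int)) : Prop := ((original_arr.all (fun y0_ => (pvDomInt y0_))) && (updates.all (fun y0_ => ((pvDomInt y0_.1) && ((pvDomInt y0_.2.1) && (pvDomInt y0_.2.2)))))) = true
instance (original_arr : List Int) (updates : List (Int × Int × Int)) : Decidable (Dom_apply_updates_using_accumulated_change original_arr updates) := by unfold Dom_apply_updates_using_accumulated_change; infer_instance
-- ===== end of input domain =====

-- B drops A's change-log array and prefix-sum pass and applies each update immediately as two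
-- direct suffix scans (+v from position L, -v from position R+1). Equivalence is about the
-- RETURN value; on inputs inside Pre_ both Pythons also mutate original_arr in place to the
-- same final content.

-- ===== PORT A =====
def pvLogStep (cl : List Int) (u : Int × Int × Int) : List Int :=
  let cl1 := PySem.List.pySetD cl u.1 (PySem.List.pyGetD cl u.1 0 + u.2.2)
  PySem.List.pySetD cl1 (u.2.1 + 1) (PySem.List.pyGetD cl1 (u.2.1 + 1) 0 - u.2.2)

def pvPrefixStep (change_log : List Int) (st : List Int × Int) (i : Int) : List Int × Int :=
  let c := st.2 + PySem.List.pyGetD change_log i 0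
  (PySem.List.pySetD st.1 i (PySem.List.pyGetD st.1 i 0 + c), c)

def apply_updates_using_accumulated_change (original_arr : List Int) (updates : List (Int × Int × Int)) : List Int :=
  let n := original_arr.length
  let change_log := updates.foldl pvLogStep (List.replicate (n + 1) 0)
  ((PySem.List.pyRange 0 (n : Int) 1).foldl (pvPrefixStep change_log) (original_arr, 0)).1

-- ===== PORT B =====
def pvAddAt (v : Int) (arr : List Int) (i : Int) : List Int :=
  PySem.List.pySetD arr i (PySem.List.pyGetD arr i 0 + v)

def pvSubAt (v : Int) (arr : List Int) (i : Int) : List Int :=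
  PySem.List.pySetD arr i (PySem.List.pyGetD arr i 0 - v)

def apply_updates_using_accumulated_change_alt (original_arr : List Int) (updates : List (Int × Int × Int)) : List Int :=
  let n : Int := original_arr.length
  updates.foldl (fun acc u =>
    (PySem.List.pyRange (u.2.1 + 1) n 1).foldl (pvSubAt u.2.2)
      ((PySem.List.pyRange u.1 n 1).foldl (pvAddAt u.2.2) acc)) original_arr

-- ===== PRECONDITION & SPEC =====
-- Pre_ requires each update's two change-log positions L and R+1 to lie in [-n, n] (below
-- -(n+1) or above n A raises IndexError; at exactly -(n+1) A returns via wraparound but B's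
-- suffix scan raises), and excludes updates with a negative endpoint that actually change
-- something (v ≠ 0 and L ≠ R+1): on those A's value is an accident of Python's
-- negative-index wraparound in the length-(n+1) change log while B's direct element indexing
-- wraps on the length-n array itself — both behaviours are implementation artefacts, so
-- neither is claimed.
def Pre_apply_updates_using_accumulated_change (original_arr : List Int) (updates : List (Int × Int × Int)) : Prop :=
  ∀ u ∈ updates, -(original_arr.length : Int) ≤ u.1 ∧ u.1 ≤ (original_arr.length : Int)
    ∧ -(original_arr.length : Int) ≤ u.2.1 + 1 ∧ u.2.1 + 1 ≤ (original_arr.length : Int)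
    ∧ ((0 ≤ u.1 ∧ 0 ≤ u.2.1 + 1) ∨ u.2.2 = 0 ∨ u.1 = u.2.1 + 1)
instance (original_arr : List Int) (updates : List (Int × Int × Int)) : Decidable (Pre_apply_updates_using_accumulated_change original_arr updates) := by unfold Pre_apply_updates_using_accumulated_change; infer_instance

def pvWitness_apply_updates_using_accumulated_change : List Int × (List (Int × Int × Int)) :=
  ([1, 2, 3], [(0, 1, 2), (2, 0, 5)])

def Spec_apply_updates_using_accumulated_change (original_arr : List Int) (updates : List (Int × Int × Int)) (out : List Int) : Prop := out = apply_updates_using_accumulated_change_alt original_arr updates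
instance (original_arr : List Int) (updates : List (Int × Int × Int)) (out : List Int) : Decidable (Spec_apply_updates_using_accumulated_change original_arr updates out) := by unfold Spec_apply_updates_using_accumulated_change; infer_instance

-- ===== CLAIM (what is proved, stated in full; the proofs are below) =====
def Claim_equal_apply_updates_using_accumulated_change : Prop := ∀ (original_arr : List Int) (updates : List (Int × Int × Int)), Dom_apply_updates_using_accumulated_change original_arr updates → Pre_apply_updates_using_accumulated_change original_arr updates → Spec_apply_updates_using_accumulated_change original_arr updates (apply_updates_using_accumulated_change original_arr updates)

-- ===== LEMMAS AND PROOFS =====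

-- the Nat index a (possibly negative) Python index i resolves to in a list of length m
def pvIdxN (m : Nat) (i : Int) : Nat := if 0 ≤ i then i.toNat else m - (-i).toNat

theorem pvIdxN_lt (m : Nat) (i : Int) (h1 : -(m : Int) ≤ i) (h2 : i < (m : Int)) :
    pvIdxN m i < m := by
  unfold pvIdxN; split_ifs <;> omega

theorem pvGetD_norm (xs : List Int) (i : Int) (d : Int)
    (h1 : -(xs.length : Int) ≤ i) (_h2 : i < (xs.length : Int)) :
    PySem.List.pyGetD xs i d = PySem.List.pyGetD xs ((pvIdxN xs.length i : Nat) : Int) d := by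
  unfold pvIdxN
  split_ifs with h
  · congr 1; omega
  · calc PySem.List.pyGetD xs i d
        = PySem.List.pyGetD xs (-(((-i).toNat : Nat) : Int)) d := by
          rw [show -((((-i).toNat : Nat)) : Int) = i by omega]
      _ = xs[xs.length - (-i).toNat]'(by omega) :=
          PySem.List.pyGetD_neg_natCast xs ((-i).toNat) d (by omega) (by omega)
      _ = PySem.List.pyGetD xs (((xs.length - (-i).toNat : Nat) : Nat) : Int) d := by
          rw [PySem.List.pyGetD_natCast, List.getD_eq_getElem _ d (by omega)]

theorem pvSetD_norm (xs : List Int) (i : Int) (v : Int)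
    (h1 : -(xs.length : Int) ≤ i) (_h2 : i < (xs.length : Int)) :
    PySem.List.pySetD xs i v = PySem.List.pySetD xs ((pvIdxN xs.length i : Nat) : Int) v := by
  unfold pvIdxN
  split_ifs with h
  · congr 1; omega
  · simp only [PySem.List.pySetD, PySem.List.pySet?, PySem.List.pyIdx?]
    rw [if_neg h, if_pos (show -((xs.length : Int)) ≤ i by omega),
        if_pos (show (0 : Int) ≤ ((xs.length - (-i).toNat : Nat) : Int) by positivity),
        if_pos (show (((xs.length - (-i).toNat : Nat)) : Int) < (xs.length : Int) by omega)]
    simp only [Option.map_some, Option.getD_some, Int.toNat_natCast]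

theorem pvAddAt_length (v : Int) (arr : List Int) (i : Int) :
    (pvAddAt v arr i).length = arr.length := by
  simp [pvAddAt, PySem.List.length_pySetD]

theorem pvSubAt_length (v : Int) (arr : List Int) (i : Int) :
    (pvSubAt v arr i).length = arr.length := by
  simp [pvSubAt, PySem.List.length_pySetD]

-- the additive effect at Nat position j of one arr[i] += v, for ANY Int index i
def pvHit (m : Nat) (i : Int) (j : Nat) (v : Int) : Int :=
  if -(m : Int) ≤ i ∧ i < (m : Int) ∧ pvIdxN m i = j then v else 0

theorem pvAddAt_getD_any (v : Int) (arr : List Int) (i : Int) (j : Nat) :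
    PySem.List.pyGetD (pvAddAt v arr i) ((j : Nat) : Int) 0
      = PySem.List.pyGetD arr ((j : Nat) : Int) 0 + pvHit arr.length i j v := by
  unfold pvAddAt pvHit
  by_cases h : -(arr.length : Int) ≤ i ∧ i < (arr.length : Int)
  · rw [pvSetD_norm arr i _ h.1 h.2, pvGetD_norm arr i _ h.1 h.2]
    rw [PySem.List.pyGetD_pySetD_natCast arr (pvIdxN arr.length i) j _ 0 (pvIdxN_lt _ _ h.1 h.2)]
    by_cases he : j = pvIdxN arr.length i
    · rw [if_pos he, if_pos ⟨h.1, h.2, he.symm⟩, he]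
    · rw [if_neg he, if_neg (fun hc => he hc.2.2.symm)]
      ring
  · have hnone : PySem.List.pySet? arr i (PySem.List.pyGetD arr i 0 + v) = none := by
      rw [PySem.List.pySet?_eq_none_iff]
      intro hc
      simp only [PySem.Raise.InRange] at hc
      omega
    rw [if_neg (by tauto)]
    simp [PySem.List.pySetD, hnone]

theorem pvSubAt_getD_any (v : Int) (arr : List Int) (i : Int) (j : Nat) :
    PySem.List.pyGetD (pvSubAt v arr i) ((j : Nat) : Int) 0
      = PySem.List.pyGetD arr ((j : Nat) : Int) 0 - pvHit arr.length i j v := by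
  unfold pvSubAt pvHit
  by_cases h : -(arr.length : Int) ≤ i ∧ i < (arr.length : Int)
  · rw [pvSetD_norm arr i _ h.1 h.2, pvGetD_norm arr i _ h.1 h.2]
    rw [PySem.List.pyGetD_pySetD_natCast arr (pvIdxN arr.length i) j _ 0 (pvIdxN_lt _ _ h.1 h.2)]
    by_cases he : j = pvIdxN arr.length i
    · rw [if_pos he, if_pos ⟨h.1, h.2, he.symm⟩, he]
    · rw [if_neg he, if_neg (fun hc => he hc.2.2.symm)]
      ring
  · have hnone : PySem.List.pySet? arr i (PySem.List.pyGetD arr i 0 - v) = none := by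
      rw [PySem.List.pySet?_eq_none_iff]
      intro hc
      simp only [PySem.Raise.InRange] at hc
      omega
    rw [if_neg (by tauto)]
    simp [PySem.List.pySetD, hnone]

theorem pvFoldAdd_sum (v : Int) (n : Nat) (l : List Int) :
    ∀ (arr : List Int), arr.length = n →
    ((l.foldl (pvAddAt v) arr).length = n) ∧
    ∀ j : Nat, PySem.List.pyGetD (l.foldl (pvAddAt v) arr) ((j : Nat) : Int) 0
      = PySem.List.pyGetD arr ((j : Nat) : Int) 0 + (l.map (fun i => pvHit n i j v)).sum := by
  induction l with
  | nil => exact fun arr hn => ⟨hn, fun j => by simp⟩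
  | cons i l ih =>
      intro arr hn
      obtain ⟨L, G⟩ := ih (pvAddAt v arr i) (by rw [pvAddAt_length, hn])
      refine ⟨by rw [List.foldl_cons]; exact L, fun j => ?_⟩
      rw [List.foldl_cons, G j, pvAddAt_getD_any, hn]
      simp only [List.map_cons, List.sum_cons]
      ring

theorem pvFoldSub_sum (v : Int) (n : Nat) (l : List Int) :
    ∀ (arr : List Int), arr.length = n →
    ((l.foldl (pvSubAt v) arr).length = n) ∧
    ∀ j : Nat, PySem.List.pyGetD (l.foldl (pvSubAt v) arr) ((j : Nat) : Int) 0
      = PySem.List.pyGetD arr ((j : Nat) : Int) 0 - (l.map (fun i => pvHit n i j v)).sum := by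
  induction l with
  | nil => exact fun arr hn => ⟨hn, fun j => by simp⟩
  | cons i l ih =>
      intro arr hn
      obtain ⟨L, G⟩ := ih (pvSubAt v arr i) (by rw [pvSubAt_length, hn])
      refine ⟨by rw [List.foldl_cons]; exact L, fun j => ?_⟩
      rw [List.foldl_cons, G j, pvSubAt_getD_any, hn]
      simp only [List.map_cons, List.sum_cons]
      ring

-- the summed hits of a suffix scan starting at a nonnegative position
theorem pvSumHit_nonneg (v : Int) (n : Nat) (j : Nat) (k : Nat) :
    ∀ (a : Int), ((n : Int) - a).toNat = k → 0 ≤ a →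
    ((PySem.List.pyRange a (n : Int) 1).map (fun i => pvHit n i j v)).sum
      = if a ≤ (j : Int) ∧ (j : Int) < (n : Int) then v else 0 := by
  induction k with
  | zero =>
      intro a hk ha
      rw [PySem.List.pyRange_one_eq_nil (by omega)]
      rw [if_neg (by omega)]
      rfl
  | succ k ih =>
      intro a hk ha
      have hab : a < (n : Int) := by omega
      rw [PySem.List.pyRange_one_cons hab]
      simp only [List.map_cons, List.sum_cons]
      rw [ih (a + 1) (by omega) (by omega)]
      unfold pvHit pvIdxN
      rw [if_pos ha]
      split_ifs <;> first | (exfalso; omega) | ring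

-- per-cell content of A's change log (relative to the all-zero log)
def pvLog (n : Nat) (updates : List (Int × Int × Int)) (j : Int) : Int :=
  (updates.map (fun u =>
    (if ((pvIdxN (n + 1) u.1 : Nat) : Int) = j then u.2.2 else 0)
    + (if ((pvIdxN (n + 1) (u.2.1 + 1) : Nat) : Int) = j then -u.2.2 else 0))).sum

-- per-element total increment of A's prefix-summed change log at index j
def pvDelta (n : Nat) (updates : List (Int × Int × Int)) (j : Int) : Int :=
  (updates.map (fun u =>
    (if ((pvIdxN (n + 1) u.1 : Nat) : Int) ≤ j ∧ j < (n : Int) then u.2.2 else 0)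
    - (if ((pvIdxN (n + 1) (u.2.1 + 1) : Nat) : Int) ≤ j ∧ j < (n : Int) then u.2.2 else 0))).sum

-- B's fold realises exactly A's per-element increment, update by update
theorem pvAltFold_spec (n : Nat) (updates : List (Int × Int × Int)) :
    ∀ (arr : List Int), arr.length = n →
    (∀ u ∈ updates, -(n : Int) ≤ u.1 ∧ u.1 ≤ (n : Int) ∧ -(n : Int) ≤ u.2.1 + 1 ∧ u.2.1 + 1 ≤ (n : Int)
      ∧ ((0 ≤ u.1 ∧ 0 ≤ u.2.1 + 1) ∨ u.2.2 = 0 ∨ u.1 = u.2.1 + 1)) →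
    (updates.foldl (fun acc u =>
        (PySem.List.pyRange (u.2.1 + 1) (n : Int) 1).foldl (pvSubAt u.2.2)
          ((PySem.List.pyRange u.1 (n : Int) 1).foldl (pvAddAt u.2.2) acc)) arr).length = n ∧
    ∀ j : Nat, PySem.List.pyGetD (updates.foldl (fun acc u =>
        (PySem.List.pyRange (u.2.1 + 1) (n : Int) 1).foldl (pvSubAt u.2.2)
          ((PySem.List.pyRange u.1 (n : Int) 1).foldl (pvAddAt u.2.2) acc)) arr) ((j : Nat) : Int) 0
      = PySem.List.pyGetD arr ((j : Nat) : Int) 0 + pvDelta n updates ((j : Nat) : Int) := by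
  induction updates with
  | nil => intro arr hn _; exact ⟨hn, fun j => by simp [pvDelta]⟩
  | cons u us ih =>
      intro arr hn h
      obtain ⟨b1, b2, b3, b4, hshape⟩ := h u (by simp)
      simp only [List.foldl_cons]
      obtain ⟨LA, GA⟩ := pvFoldAdd_sum u.2.2 n (PySem.List.pyRange u.1 (n : Int) 1) arr hn
      obtain ⟨LS, GS⟩ := pvFoldSub_sum u.2.2 n (PySem.List.pyRange (u.2.1 + 1) (n : Int) 1)
        ((PySem.List.pyRange u.1 (n : Int) 1).foldl (pvAddAt u.2.2) arr) LA
      obtain ⟨L2, G2⟩ := ih _ LS (fun w hw => h w (List.mem_cons_of_mem u hw))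
      refine ⟨L2, fun j => ?_⟩
      rw [G2 j, GS j, GA j]
      have hterm : ((PySem.List.pyRange u.1 (n : Int) 1).map (fun i => pvHit n i j u.2.2)).sum
            - ((PySem.List.pyRange (u.2.1 + 1) (n : Int) 1).map (fun i => pvHit n i j u.2.2)).sum
          = (if ((pvIdxN (n + 1) u.1 : Nat) : Int) ≤ ((j : Nat) : Int) ∧ ((j : Nat) : Int) < (n : Int) then u.2.2 else 0)
            - (if ((pvIdxN (n + 1) (u.2.1 + 1) : Nat) : Int) ≤ ((j : Nat) : Int) ∧ ((j : Nat) : Int) < (n : Int) then u.2.2 else 0) := by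
        rcases hshape with ⟨l0, r0⟩ | hv0 | heq
        · rw [pvSumHit_nonneg u.2.2 n j ((n : Int) - u.1).toNat u.1 rfl l0,
              pvSumHit_nonneg u.2.2 n j ((n : Int) - (u.2.1 + 1)).toNat (u.2.1 + 1) rfl r0]
          have e1 : ((pvIdxN (n + 1) u.1 : Nat) : Int) = u.1 := by unfold pvIdxN; split_ifs <;> omega
          have e2 : ((pvIdxN (n + 1) (u.2.1 + 1) : Nat) : Int) = u.2.1 + 1 := by
            unfold pvIdxN; split_ifs <;> omega
          rw [e1, e2]
        · rw [hv0]
          have z : ∀ (l : List Int), (l.map (fun i => pvHit n i j 0)).sum = 0 := by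
            intro l
            apply List.sum_eq_zero
            intro x hx
            obtain ⟨i, _, hi⟩ := List.mem_map.mp hx
            rw [← hi]
            unfold pvHit
            split_ifs <;> rfl
          rw [z, z]
          split_ifs <;> ring
        · rw [← heq]
          ring
      simp only [pvDelta, List.map_cons, List.sum_cons]
      linarith [hterm]

theorem pvLogFold_spec (n : Nat) (updates : List (Int × Int × Int)) :
    ∀ (cl : List Int), cl.length = n + 1 →
    (∀ u ∈ updates, -((n : Int) + 1) ≤ u.1 ∧ u.1 ≤ (n : Int)
      ∧ -((n : Int) + 1) ≤ u.2.1 + 1 ∧ u.2.1 + 1 ≤ (n : Int)) →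
    (updates.foldl pvLogStep cl).length = n + 1 ∧
    ∀ j : Nat, PySem.List.pyGetD (updates.foldl pvLogStep cl) (j : Int) 0
      = PySem.List.pyGetD cl (j : Int) 0 + pvLog n updates (j : Int) := by
  induction updates with
  | nil => intro cl hcl _; exact ⟨hcl, fun j => by simp [pvLog]⟩
  | cons u us ih =>
      intro cl hcl h
      obtain ⟨h1, h2, h3, h4⟩ := h u (by simp)
      have hb1 : -((cl.length : Int)) ≤ u.1 := by rw [hcl]; push_cast; omega
      have hb2 : u.1 < (cl.length : Int) := by rw [hcl]; push_cast; omega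
      have hb3 : -((cl.length : Int)) ≤ u.2.1 + 1 := by rw [hcl]; push_cast; omega
      have hb4 : u.2.1 + 1 < (cl.length : Int) := by rw [hcl]; push_cast; omega
      have ha : pvIdxN cl.length u.1 < cl.length := pvIdxN_lt _ _ hb1 hb2
      have hbn : pvIdxN cl.length (u.2.1 + 1) < cl.length := pvIdxN_lt _ _ hb3 hb4
      have hlen : (pvLogStep cl u).length = cl.length := by
        simp [pvLogStep, PySem.List.length_pySetD]
      have hstep : ∀ j : Nat, PySem.List.pyGetD (pvLogStep cl u) (j : Int) 0
          = PySem.List.pyGetD cl (j : Int) 0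
            + ((if ((pvIdxN cl.length u.1 : Nat) : Int) = (j : Int) then u.2.2 else 0)
              + (if ((pvIdxN cl.length (u.2.1 + 1) : Nat) : Int) = (j : Int) then -u.2.2 else 0)) := by
        intro j
        simp only [pvLogStep]
        rw [pvSetD_norm cl u.1 _ hb1 hb2, pvGetD_norm cl u.1 _ hb1 hb2]
        rw [pvSetD_norm _ (u.2.1 + 1) _ (by rw [PySem.List.length_pySetD]; exact hb3)
              (by rw [PySem.List.length_pySetD]; exact hb4),
            pvGetD_norm _ (u.2.1 + 1) _ (by rw [PySem.List.length_pySetD]; exact hb3)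
              (by rw [PySem.List.length_pySetD]; exact hb4)]
        simp only [PySem.List.length_pySetD]
        rw [PySem.List.pyGetD_pySetD_natCast _ (pvIdxN cl.length (u.2.1 + 1)) j _ 0
              (by rw [PySem.List.length_pySetD]; exact hbn)]
        rw [PySem.List.pyGetD_pySetD_natCast cl (pvIdxN cl.length u.1) (pvIdxN cl.length (u.2.1 + 1)) _ 0 ha]
        rw [PySem.List.pyGetD_pySetD_natCast cl (pvIdxN cl.length u.1) j _ 0 ha]
        by_cases heq : pvIdxN cl.length (u.2.1 + 1) = pvIdxN cl.length u.1
        · rw [heq]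
          split_ifs <;> subst_vars <;> first | (exfalso; omega) | ring
        · split_ifs <;> subst_vars <;> first | (exfalso; omega) | ring
      simp only [hcl] at hstep
      obtain ⟨L2, G2⟩ := ih (pvLogStep cl u) (by rw [hlen, hcl])
        (fun w hw => h w (List.mem_cons_of_mem u hw))
      refine ⟨L2, fun j => ?_⟩
      simp only [List.foldl_cons]
      rw [G2 j, hstep j]
      simp only [pvLog, List.map_cons, List.sum_cons]
      ring

theorem pvPrefixFold_spec (cl : List Int) (m : Nat) :
    ∀ (arr : List Int), m ≤ arr.length →
    (((PySem.List.pyRange 0 (m : Int) 1).foldl (pvPrefixStep cl) (arr, 0)).2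
        = ∑ t ∈ Finset.range m, PySem.List.pyGetD cl (t : Int) 0) ∧
    (((PySem.List.pyRange 0 (m : Int) 1).foldl (pvPrefixStep cl) (arr, 0)).1.length = arr.length) ∧
    ∀ j : Nat, PySem.List.pyGetD ((PySem.List.pyRange 0 (m : Int) 1).foldl (pvPrefixStep cl) (arr, 0)).1 (j : Int) 0
      = PySem.List.pyGetD arr (j : Int) 0
        + (if j < m then ∑ t ∈ Finset.range (j + 1), PySem.List.pyGetD cl (t : Int) 0 else 0) := by
  induction m with
  | zero =>
      intro arr _
      rw [show (((0 : Nat)) : Int) = 0 from rfl, PySem.List.pyRange_one_eq_nil le_rfl]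
      exact ⟨by simp, rfl, fun j => by simp⟩
  | succ m ih =>
      intro arr hm1
      obtain ⟨S, L, G⟩ := ih arr (by omega)
      have hsplit : PySem.List.pyRange 0 ((m + 1 : Nat) : Int) 1
          = PySem.List.pyRange 0 ((m : Nat) : Int) 1 ++ [((m : Nat) : Int)] := by
        push_cast
        exact PySem.List.pyRange_one_succ_right (Int.natCast_nonneg m)
      rw [hsplit, List.foldl_append]
      simp only [List.foldl_cons, List.foldl_nil, pvPrefixStep]
      refine ⟨by rw [S, Finset.sum_range_succ], by rw [PySem.List.length_pySetD, L], fun j => ?_⟩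
      rw [PySem.List.pyGetD_pySetD_natCast _ m j _ 0 (by rw [L]; omega)]
      rw [G m, G j, S, if_neg (lt_irrefl m)]
      by_cases hj : j = m
      · subst hj
        rw [if_pos rfl, if_pos (Nat.lt_succ_self j), Finset.sum_range_succ]
        ring
      · rw [if_neg hj]
        split_ifs <;> first | rfl | (exfalso; omega)

theorem pvSumSwap {α : Type} (us : List α) (g : α → Nat → Int) (m : Nat) :
    ∑ t ∈ Finset.range m, (us.map (fun u => g u t)).sum
      = (us.map (fun u => ∑ t ∈ Finset.range m, g u t)).sum := by
  induction us with
  | nil => simp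
  | cons u us ih => simp [Finset.sum_add_distrib, ih]

theorem pvSumIte (c v : Int) (m : Nat) (hc : 0 ≤ c) :
    ∑ t ∈ Finset.range m, (if c = (t : Int) then v else 0) = if c < (m : Int) then v else 0 := by
  induction m with
  | zero => simp; omega
  | succ m ih =>
      rw [Finset.sum_range_succ, ih]
      push_cast
      split_ifs <;> first | (exfalso; omega) | ring

-- prefix sums of the log collapse to the per-element increment
theorem pvLogPrefix_eq_delta (updates : List (Int × Int × Int)) (n : Nat) (j : Nat) (hj : j < n) :
    ∑ t ∈ Finset.range (j + 1), pvLog n updates (t : Int) = pvDelta n updates (j : Int) := by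
  simp only [pvLog]
  rw [pvSumSwap updates
        (fun u t => (if ((pvIdxN (n + 1) u.1 : Nat) : Int) = (t : Int) then u.2.2 else 0)
          + (if ((pvIdxN (n + 1) (u.2.1 + 1) : Nat) : Int) = (t : Int) then -u.2.2 else 0))
        (j + 1)]
  unfold pvDelta
  refine congrArg List.sum (List.map_congr_left ?_)
  intro u _
  rw [Finset.sum_add_distrib,
      pvSumIte ((pvIdxN (n + 1) u.1 : Nat) : Int) u.2.2 (j + 1) (by positivity),
      pvSumIte ((pvIdxN (n + 1) (u.2.1 + 1) : Nat) : Int) (-u.2.2) (j + 1) (by positivity)]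
  push_cast
  split_ifs <;> first | (exfalso; omega) | ring

theorem pvGetD_replicate_zero (n t : Nat) :
    PySem.List.pyGetD (List.replicate n (0 : Int)) (t : Int) 0 = 0 := by
  rw [PySem.List.pyGetD_natCast]
  rcases Nat.lt_or_ge t n with h | h
  · simp [List.getD_eq_getElem?_getD, h]
  · simp [List.getD_eq_getElem?_getD,
        List.getElem?_eq_none (show (List.replicate n (0 : Int)).length ≤ t by simpa using h)]

-- ===== VERDICT (by name: the statement is the Claim_ definition above) =====
theorem apply_updates_using_accumulated_change_spec : Claim_equal_apply_updates_using_accumulated_change := by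
  intro arr updates _ hpre
  unfold Spec_apply_updates_using_accumulated_change
  obtain ⟨LB, GB⟩ := pvAltFold_spec arr.length updates arr rfl
    (fun u hu => by
      obtain ⟨a1, a2, a3, a4, a5⟩ := hpre u hu
      exact ⟨a1, a2, a3, a4, a5⟩)
  obtain ⟨Llog, Glog⟩ := pvLogFold_spec arr.length updates (List.replicate (arr.length + 1) 0)
    (by rw [List.length_replicate])
    (fun u hu => by obtain ⟨a1, a2, a3, a4, _⟩ := hpre u hu; exact ⟨by omega, a2, by omega, a4⟩)
  obtain ⟨_, LA, GA⟩ := pvPrefixFold_spec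
    (updates.foldl pvLogStep (List.replicate (arr.length + 1) 0)) arr.length arr le_rfl
  have hA : apply_updates_using_accumulated_change arr updates
      = ((PySem.List.pyRange 0 ((arr.length : Nat) : Int) 1).foldl
          (pvPrefixStep (updates.foldl pvLogStep (List.replicate (arr.length + 1) 0))) (arr, 0)).1 := rfl
  have hB : apply_updates_using_accumulated_change_alt arr updates
      = updates.foldl (fun acc u =>
          (PySem.List.pyRange (u.2.1 + 1) ((arr.length : Nat) : Int) 1).foldl (pvSubAt u.2.2)
            ((PySem.List.pyRange u.1 ((arr.length : Nat) : Int) 1).foldl (pvAddAt u.2.2) acc)) arr := rfl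
  rw [hA, hB]
  apply List.ext_getElem (by rw [LA, LB])
  intro i hi1 hi2
  have toGetD : ∀ (xs : List Int) (k : Nat) (hk : k < xs.length), xs[k] = PySem.List.pyGetD xs (k : Int) 0 := by
    intro xs k hk
    rw [PySem.List.pyGetD_natCast, List.getD_eq_getElem _ 0 hk]
  have hin : i < arr.length := by rw [LA] at hi1; exact hi1
  rw [toGetD _ i hi1, toGetD _ i hi2, GA i, GB i, if_pos hin]
  have hsum : ∑ t ∈ Finset.range (i + 1),
      PySem.List.pyGetD (updates.foldl pvLogStep (List.replicate (arr.length + 1) 0)) (t : Int) 0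
      = pvDelta arr.length updates (i : Int) := by
    calc ∑ t ∈ Finset.range (i + 1),
        PySem.List.pyGetD (updates.foldl pvLogStep (List.replicate (arr.length + 1) 0)) (t : Int) 0
        = ∑ t ∈ Finset.range (i + 1), pvLog arr.length updates (t : Int) := by
          refine Finset.sum_congr rfl fun t _ => ?_
          rw [Glog t, pvGetD_replicate_zero, zero_add]
      _ = pvDelta arr.length updates (i : Int) :=
          pvLogPrefix_eq_delta updates arr.length i hin
  rw [hsum]
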